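-- pv_equiv track=rewrite | github.com/IsabellaPap/TOIproject | erwtima_6.py | decoding01
-- ===== SOURCE A (Python) =====
-- def decoding01(mes,code):
--     decoded = []
--     for i in range(0,len(mes)):
--         letter = ''
--         # checks for every value if it matches with codeword
--         # because it is a "prefix code" we will not have matches regardless of the length we check
--         for key, value in code.items():
--             # for every codeword it checks if the same length matches the code
--             if value == mes[i:i+len(code[key])]:
--                 letter = key
--         i += len(letter)
--      # if you uncomment the difference from the original message increases
--      #   if letter == '':
--       #      letter = '_'
--         decoded.append(letter)
--     return ''.join(decoded)
-- ===== SOURCE B (Python) =====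
-- def decoding01(mes, code):
--     # Look codewords up by value, trying only the distinct codeword lengths at
--     # each position: with a prefix code at most one codeword can match there.
--     by_value = {v: k for k, v in code.items()}
--     lengths = sorted({len(v) for v in by_value})
--     decoded = []
--     for i in range(len(mes)):
--         letter = ''
--         for L in lengths:
--             k = by_value.get(mes[i:i+L])
--             if k is not None:
--                 letter = k
--                 break
--         decoded.append(letter)
--     return ''.join(decoded)
-- ===== Notes on version B (the rewrite author's own statement) =====
-- stated objective: faster
-- what changed: B inverts the code dict once (value->key) and at each message position probes only the distinct codeword lengths with a hash lookup, instead of rescanning every codeword; Pre_ excludes inputs where two different codeword values match at the same message position, where A's 'last dict entry wins' pick is as defensible as B's 'shortest match wins'.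
-- outside the precondition, e.g. on decoding01('01', {'a': '0', 'b': '01'}): A returns 'b', B returns 'a'
import Mathlib
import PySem

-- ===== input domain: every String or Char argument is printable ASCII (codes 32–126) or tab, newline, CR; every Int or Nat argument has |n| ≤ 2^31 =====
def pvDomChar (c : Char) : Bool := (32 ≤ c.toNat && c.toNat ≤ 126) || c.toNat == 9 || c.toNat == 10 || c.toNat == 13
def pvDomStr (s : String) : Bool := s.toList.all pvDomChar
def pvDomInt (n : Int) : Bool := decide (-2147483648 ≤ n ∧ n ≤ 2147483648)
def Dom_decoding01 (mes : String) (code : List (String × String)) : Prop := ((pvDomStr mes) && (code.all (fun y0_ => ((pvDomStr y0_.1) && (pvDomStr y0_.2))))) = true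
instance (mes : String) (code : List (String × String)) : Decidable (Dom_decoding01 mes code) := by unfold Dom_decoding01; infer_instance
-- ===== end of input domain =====

-- B inverts the codeword dict once (value -> key) and probes only the distinct codeword
-- lengths per message position; Pre_ excludes messages on which two different codewords match at one position (an unspecified tie).


-- ===== PORT A =====
-- literal port of A: for each i in range(len(mes)), scan every (key, value) of the dict and
-- keep the key of the LAST value equal to mes[i:i+len(code[key])] (the loop variable
-- reassignment 'i += len(letter)' is dead — 'for' rebinds i — so it is not ported).
def decoding01 (mes : String) (code : List (String × String)) : String :=
  let d := PySem.Dict.ofList code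
  let decoded : List String :=
    (PySem.List.pyRange 0 (PySem.Str.len mes) 1).foldl (fun decoded i =>
      let letter : String := d.items.foldl (fun letter kv =>
        if kv.2 == PySem.Str.slice mes (some i) (some (i + PySem.Str.len ((d.get? kv.1).getD "")))
        then kv.1 else letter) ""
      decoded ++ [letter]) []
  PySem.Str.join "" decoded

-- ===== PORT B =====
-- port of Source B's inner 'for L in lengths: … break' loop
def findLetter (byValue : PySem.Dict String String) (mes : String) (i : Int) : List Int → String
  | [] => ""
  | L :: rest =>
    match byValue.get? (PySem.Str.slice mes (some i) (some (i + L))) with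
    | some k => k
    | none => findLetter byValue mes i rest

-- literal port of Source B: invert the dict (value -> key), probe each distinct length per position.
def decoding01_alt (mes : String) (code : List (String × String)) : String :=
  let d := PySem.Dict.ofList code
  let byValue : PySem.Dict String String :=
    d.items.foldl (fun m kv => m.insert kv.2 kv.1) PySem.Dict.empty
  let lengths : List Int :=
    PySem.List.sorted (PySem.Set.ofList (byValue.keys.map (fun v => PySem.Str.len v))) (fun x => x) false
  let decoded : List String :=
    (PySem.List.pyRange 0 (PySem.Str.len mes) 1).foldl (fun decoded i =>
      decoded ++ [findLetter byValue mes i lengths]) []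
  PySem.Str.join "" decoded

-- ===== PRECONDITION & SPEC =====
-- Pre_ excludes the (mes, code) pairs on which, at some position of the message, two
-- DIFFERENT codeword values both match: there A's 'last dict entry wins' pick among the
-- simultaneous matches is as defensible as B's 'shortest match wins' — an unspecified tie.
def Pre_decoding01 (mes : String) (code : List (String × String)) : Prop :=
  ∀ j : Nat, j < mes.toList.length →
    ∀ u ∈ (PySem.Dict.ofList code).values, ∀ v ∈ (PySem.Dict.ofList code).values,
      u.toList <+: mes.toList.drop j → v.toList <+: mes.toList.drop j → u = v
instance (mes : String) (code : List (String × String)) : Decidable (Pre_decoding01 mes code) := by unfold Pre_decoding01; infer_instance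

def pvWitness_decoding01 : String × (List (String × String)) :=
  ("0110", [("a", "0"), ("b", "10"), ("c", "11")])

def Spec_decoding01 (mes : String) (code : List (String × String)) (out : String) : Prop := out = decoding01_alt mes code
instance (mes : String) (code : List (String × String)) (out : String) : Decidable (Spec_decoding01 mes code out) := by unfold Spec_decoding01; infer_instance

-- ===== CLAIM (what is proved, stated in full; the proofs are below) =====
def Claim_equal_decoding01 : Prop := ∀ (mes : String) (code : List (String × String)), Dom_decoding01 mes code → Pre_decoding01 mes code → Spec_decoding01 mes code (decoding01 mes code)

-- ===== LEMMAS AND PROOFS =====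

theorem foldl_if_last {α β : Type} (p : α → Bool) (f : α → β) (l : List α) (a0 : β) :
    l.foldl (fun a x => if p x then f x else a) a0 =
      match l.reverse.find? p with
      | some x => f x
      | none => a0 := by
  induction l generalizing a0 with
  | nil => rfl
  | cons x t ih =>
    simp only [List.foldl_cons, List.reverse_cons, List.find?_append, ih]
    cases h : t.reverse.find? p with
    | some y => simp
    | none => by_cases hp : p x = true <;> simp [hp]

theorem get?_foldl_insert_swap (l : List (String × String)) (m0 : PySem.Dict String String) (s : String) :
    (l.foldl (fun m kv => m.insert kv.2 kv.1) m0).get? s =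
      match l.reverse.find? (fun kv => kv.2 == s) with
      | some kv => some kv.1
      | none => m0.get? s := by
  induction l generalizing m0 with
  | nil => rfl
  | cons kv t ih =>
    simp only [List.foldl_cons, List.reverse_cons, List.find?_append, ih]
    cases h : t.reverse.find? (fun kv => kv.2 == s) with
    | some y => simp
    | none =>
      by_cases hk : kv.2 = s
      · simp [hk]
      · simp [hk, PySem.Dict.get?_insert_of_ne _ _ (fun he => hk he.symm)]

theorem find?_congr_mem {α : Type} (p q : α → Bool) (l : List α) (h : ∀ x ∈ l, p x = q x) :
    l.find? p = l.find? q := by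
  induction l with
  | nil => rfl
  | cons x t ih =>
    simp only [List.find?_cons, h x (by simp)]
    cases q x
    · exact ih (fun y hy => h y (by simp [hy]))
    · rfl

theorem match_iff (mes w : String) (j : Nat) :
    (w == PySem.Str.slice mes (some (j : Int)) (some ((j : Int) + PySem.Str.len w))) = true
      ↔ w.toList <+: mes.toList.drop j := by
  rw [beq_iff_eq, ← String.toList_inj]
  have hlen : PySem.Str.len w = (w.toList.length : Int) := by simp
  rw [hlen]
  have hs : (PySem.Str.slice mes (some (j:Int)) (some ((j:Int) + (w.toList.length:Int)))).toList
      = (mes.toList.drop j).take w.toList.length := by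
    simp [PySem.List.slice_natCast_add]
  rw [hs, List.prefix_iff_eq_take]

theorem findLetter_eq_of (byv : PySem.Dict String String) (mes : String) (i : Int) (lst : List Int) (c : String)
    (hall : ∀ L ∈ lst, ∀ k, byv.get? (PySem.Str.slice mes (some i) (some (i + L))) = some k → k = c)
    (hex : ∃ L ∈ lst, (byv.get? (PySem.Str.slice mes (some i) (some (i + L)))).isSome) :
    findLetter byv mes i lst = c := by
  induction lst with
  | nil => obtain ⟨L, hL, _⟩ := hex; cases hL
  | cons L rest ih =>
    simp only [findLetter]
    cases h : byv.get? (PySem.Str.slice mes (some i) (some (i + L))) with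
    | some k => exact hall L (by simp) k h
    | none =>
      refine ih (fun L' hL' => hall L' (by simp [hL'])) ?_
      obtain ⟨L', hL', hs⟩ := hex
      rcases List.mem_cons.mp hL' with rfl | hL'
      · rw [h] at hs; cases hs
      · exact ⟨L', hL', hs⟩

theorem findLetter_eq_empty (byv : PySem.Dict String String) (mes : String) (i : Int) (lst : List Int)
    (hnone : ∀ L ∈ lst, byv.get? (PySem.Str.slice mes (some i) (some (i + L))) = none) :
    findLetter byv mes i lst = "" := by
  induction lst with
  | nil => rfl
  | cons L rest ih =>
    simp only [findLetter, hnone L (by simp)]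
    exact ih (fun L' hL' => hnone L' (by simp [hL']))

theorem letter_eq (mes : String) (code : List (String × String))
    (hpre : Pre_decoding01 mes code) (j : Nat) (hj : j < mes.toList.length) :
    (PySem.Dict.ofList code).items.foldl (fun letter kv =>
        if kv.2 == PySem.Str.slice mes (some (j : Int)) (some ((j : Int) + PySem.Str.len (((PySem.Dict.ofList code).get? kv.1).getD "")))
        then kv.1 else letter) ""
      = findLetter
          ((PySem.Dict.ofList code).items.foldl (fun m kv => m.insert kv.2 kv.1) PySem.Dict.empty)
          mes (j : Int)
          (PySem.List.sorted (PySem.Set.ofList ((((PySem.Dict.ofList code).items.foldl (fun m kv => m.insert kv.2 kv.1) PySem.Dict.empty)).keys.map (fun v => PySem.Str.len v))) (fun x => x) false) := by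
  set d := PySem.Dict.ofList code with hd
  set byv := d.items.foldl (fun m kv => m.insert kv.2 kv.1) PySem.Dict.empty with hbyv
  set lengths := PySem.List.sorted (PySem.Set.ofList (byv.keys.map (fun v => PySem.Str.len v))) (fun x => x) false with hlengths
  have hnd : d.keys.Nodup := PySem.Dict.nodup_keys_ofList code
  -- Pre_ specialised to position j, on the items' values
  have huniq : ∀ u ∈ d.items.map (·.2), ∀ v ∈ d.items.map (·.2),
      u.toList <+: mes.toList.drop j → v.toList <+: mes.toList.drop j → u = v := hpre j hj
  -- byv lookups come from items
  have hbyv_mem : ∀ s k, byv.get? s = some k → ∃ kv ∈ d.items, kv.2 = s ∧ kv.1 = k := by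
    intro s k h
    rw [hbyv, get?_foldl_insert_swap] at h
    cases hf : d.items.reverse.find? (fun kv => kv.2 == s) with
    | none => rw [hf] at h; simp [PySem.Dict.get?_empty] at h
    | some kv =>
      rw [hf] at h
      have hm := List.mem_reverse.mp (List.mem_of_find?_eq_some hf)
      have hp := List.find?_some hf
      exact ⟨kv, hm, by simpa using hp, by simpa using h⟩
  -- every length is a Nat cast, and a some-result of a probe is a matching item's key
  have hlen_nat : ∀ L ∈ lengths, ∃ m : Nat, L = (m : Int) := by
    intro L hL
    rw [hlengths, PySem.List.mem_sorted] at hL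
    obtain ⟨v, _, rfl⟩ := List.mem_map.mp ((PySem.Set.mem_ofList _ L).mp hL)
    exact ⟨v.toList.length, by simp⟩
  have hprobe : ∀ L ∈ lengths, ∀ k,
      byv.get? (PySem.Str.slice mes (some (j:Int)) (some ((j:Int) + L))) = some k →
      ∃ kv ∈ d.items, kv.2.toList <+: mes.toList.drop j ∧ kv.1 = k
        ∧ byv.get? kv.2 = some k := by
    intro L hL k h
    obtain ⟨kv, hkv, hv, hk⟩ := hbyv_mem _ _ h
    obtain ⟨m, rfl⟩ := hlen_nat L hL
    refine ⟨kv, hkv, ?_, hk, by rw [hv]; exact h⟩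
    have : kv.2.toList = (mes.toList.drop j).take m := by
      rw [hv]; simp [PySem.List.slice_natCast_add]
    rw [this]; exact List.take_prefix _ _
  -- rewrite A's fold body
  have hbody : d.items.foldl (fun letter kv =>
        if kv.2 == PySem.Str.slice mes (some (j : Int)) (some ((j : Int) + PySem.Str.len ((d.get? kv.1).getD "")))
        then kv.1 else letter) ""
      = d.items.foldl (fun letter kv =>
        if kv.2 == PySem.Str.slice mes (some (j : Int)) (some ((j : Int) + PySem.Str.len kv.2))
        then kv.1 else letter) "" := by
    apply PySem.List.foldl_congr_mem
    intro letter kv hkv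
    rw [PySem.Dict.get?_of_mem_items d (by simpa using hkv) hnd]
    rfl
  rw [hbody, foldl_if_last]
  cases hf : d.items.reverse.find? (fun kv => kv.2 == PySem.Str.slice mes (some (j : Int)) (some ((j : Int) + PySem.Str.len kv.2))) with
  | none =>
    rw [List.find?_eq_none] at hf
    refine (findLetter_eq_empty byv mes _ lengths ?_).symm
    intro L hL
    cases h : byv.get? (PySem.Str.slice mes (some (j:Int)) (some ((j:Int) + L))) with
    | none => rfl
    | some k =>
      obtain ⟨kv, hkv, hpref, _, _⟩ := hprobe L hL k h
      exact absurd ((match_iff mes kv.2 j).mpr hpref) (by simpa using hf kv (List.mem_reverse.mpr hkv))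
  | some kv =>
    have hkv := List.mem_reverse.mp (List.mem_of_find?_eq_some hf)
    have hpkv := List.find?_some hf
    have hmatch : kv.2.toList <+: mes.toList.drop j := (match_iff mes kv.2 j).mp (by simpa using hpkv)
    -- the two find? predicates agree on items: matching at j ↔ having value kv.2
    have hsame : ∀ x ∈ d.items.reverse,
        (x.2 == PySem.Str.slice mes (some (j : Int)) (some ((j : Int) + PySem.Str.len x.2)))
          = (x.2 == kv.2) := by
      intro x hx
      have hxm := List.mem_reverse.mp hx
      by_cases hp : x.2.toList <+: mes.toList.drop j
      · have hx2 : x.2 = kv.2 := huniq x.2 (List.mem_map_of_mem hxm) kv.2 (List.mem_map_of_mem hkv) hp hmatch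
        rw [hx2, beq_self_eq_true]
        exact (match_iff mes kv.2 j).mpr hmatch
      · have h1 : (x.2 == PySem.Str.slice mes (some (j : Int)) (some ((j : Int) + PySem.Str.len x.2))) = false := by
          rw [← Bool.not_eq_true]; intro hc; exact hp ((match_iff mes x.2 j).mp hc)
        have h2 : (x.2 == kv.2) = false := by
          rw [← Bool.not_eq_true, beq_iff_eq]; intro hc; exact hp (hc ▸ hmatch)
        rw [h1, h2]
    have hgetu : byv.get? kv.2 = some kv.1 := by
      rw [hbyv, get?_foldl_insert_swap, ← find?_congr_mem _ _ _ hsame, hf]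
    refine (findLetter_eq_of byv mes _ lengths kv.1 ?_ ?_).symm
    · intro L hL k h
      obtain ⟨kv', hkv', hpref', hk', hget'⟩ := hprobe L hL k h
      have : kv'.2 = kv.2 := huniq kv'.2 (List.mem_map_of_mem hkv') kv.2 (List.mem_map_of_mem hkv) hpref' hmatch
      rw [this, hgetu] at hget'
      exact (Option.some_inj.mp hget').symm
    · -- probe at the length of kv.2 hits
      have hkeys : byv.keys = PySem.Set.ofList (d.items.map (·.2)) := by
        rw [hbyv, PySem.Dict.keys_foldl_insert_key]
        simp [PySem.Set.update_nil_left]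
      refine ⟨PySem.Str.len kv.2, ?_, ?_⟩
      · rw [hlengths, PySem.List.mem_sorted]
        refine (PySem.Set.mem_ofList _ _).mpr ?_
        refine List.mem_map_of_mem ?_
        rw [hkeys]
        exact (PySem.Set.mem_ofList _ _).mpr (List.mem_map_of_mem hkv)
      · have hsl : PySem.Str.slice mes (some (j:Int)) (some ((j:Int) + PySem.Str.len kv.2)) = kv.2 := by
          have := hpkv
          rw [beq_iff_eq] at this
          exact this.symm
        rw [hsl, hgetu]
        rfl

-- ===== VERDICT (by name: the statement is the Claim_ definition above) =====
theorem decoding01_spec : Claim_equal_decoding01 := by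
  intro mes code _hdom hpre
  unfold Spec_decoding01 decoding01 decoding01_alt
  simp only [PySem.List.foldl_append_singleton_eq_map]
  refine congrArg (PySem.Str.join "") ?_
  refine congrArg ([] ++ ·) ?_
  refine List.map_congr_left (fun i hi => ?_)
  have h0 : 0 ≤ i := ((PySem.List.mem_pyRange_one).mp hi).1
  obtain ⟨j, rfl⟩ : ∃ j : Nat, i = (j : Int) := ⟨i.toNat, (Int.toNat_of_nonneg h0).symm⟩
  have hj : j < mes.toList.length := by
    have h1 := ((PySem.List.mem_pyRange_one).mp hi).2
    simp at h1
    exact_mod_cast h1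
  exact letter_eq mes code hpre j hj
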